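-- pv_equiv track=rewrite | github.com/cutehammond772/problem-solving-archive | 백준/Gold/21925. 짝수 팰린드롬/짝수 팰린드롬.py | solve
-- ===== SOURCE A (Python) =====
-- def solve(N, Q):
-- 	result, x = 0, 0
--
-- 	for y in range(1, N, 2):
-- 		if Q[x] != Q[y]:
-- 			continue
--
-- 		correct = True
--
-- 		for z in range(1, (y - x - 1) // 2 + 1):
-- 			if Q[x + z] != Q[y - z]:
-- 				correct = False
-- 				break
--
-- 		if correct:
-- 			result += 1
-- 			x = y + 1
--
-- 	if x != N:
-- 		return -1
--
-- 	return result
-- ===== SOURCE B (Python) =====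
-- def solve(N, Q):
--     count, x, y = 0, 0, 1
--     while y < N:
--         seg = Q[x:y + 1]
--         if seg == seg[::-1]:
--             count += 1
--             x = y + 1
--         y += 2
--     return count if x == N else -1
-- ===== Notes on version B (the rewrite author's own statement) =====
-- stated objective: simpler
-- what changed: B keeps the same greedy forward scan but replaces A's continue-driven for loop with a nested hand-rolled half-index comparison by a plain two-variable while scan that tests each candidate segment with a single slice-reversal equality (seg == seg[::-1]).
-- outside the precondition, e.g. on solve(3, [1, 1]): A returns -1, B returns -1; on solve(2, []): A raises IndexError, B returns 1
import Mathlib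
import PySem

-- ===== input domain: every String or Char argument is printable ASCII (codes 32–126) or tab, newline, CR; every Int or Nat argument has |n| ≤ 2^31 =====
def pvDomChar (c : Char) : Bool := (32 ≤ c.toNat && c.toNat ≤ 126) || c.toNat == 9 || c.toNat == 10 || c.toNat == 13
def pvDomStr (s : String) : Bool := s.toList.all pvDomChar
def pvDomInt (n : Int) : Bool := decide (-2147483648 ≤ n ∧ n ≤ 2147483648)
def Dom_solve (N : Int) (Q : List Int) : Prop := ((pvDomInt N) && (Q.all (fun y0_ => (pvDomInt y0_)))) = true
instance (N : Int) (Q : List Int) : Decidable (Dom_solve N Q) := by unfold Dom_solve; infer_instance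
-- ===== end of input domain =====

-- B keeps A's greedy forward scan but as a plain two-variable while loop testing each
-- candidate segment by slice-reversal equality (objective: simpler).


-- ===== PORT A =====
-- inner loop 'for z in range(1, (y-x-1)//2+1): if Q[x+z] != Q[y-z]: correct=False; break'
def solveInner (Q : List Int) (x y : Int) : List Int → Bool
  | [] => true
  | z :: zs =>
    if PySem.List.pyGetD Q (x + z) 0 ≠ PySem.List.pyGetD Q (y - z) 0 then false
    else solveInner Q x y zs

-- one iteration of the outer 'for y in range(1, N, 2)' body; state s = (result, x)
def solveStep (Q : List Int) (s : Int × Int) (y : Int) : Int × Int :=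
  if PySem.List.pyGetD Q s.2 0 ≠ PySem.List.pyGetD Q y 0 then s
  else if solveInner Q s.2 y
      (PySem.List.pyRange 1 (PySem.Int.floordiv (y - s.2 - 1) 2 + 1) 1) then
    (s.1 + 1, y + 1)
  else s

def solve (N : Int) (Q : List Int) : Int :=
  let s := (PySem.List.pyRange 1 N 2).foldl (solveStep Q) (0, 0)
  if s.2 ≠ N then -1 else s.1

-- ===== PORT B =====
-- 'while y < N: seg = Q[x:y+1]; if seg == seg[::-1]: count += 1; x = y + 1; y += 2'
-- (seg[::-1] is seg.reverse, per PySem.List.slice?_none_none_neg_one)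
def solveAltGo (N : Int) (Q : List Int) (count x y : Int) : Int :=
  if y < N then
    let seg := PySem.List.slice Q (some x) (some (y + 1))
    if seg = seg.reverse then solveAltGo N Q (count + 1) (y + 1) (y + 2)
    else solveAltGo N Q count x (y + 2)
  else if x = N then count else -1
termination_by (N - y).toNat
decreasing_by all_goals omega

def solve_alt (N : Int) (Q : List Int) : Int := solveAltGo N Q 0 0 1

-- ===== PRECONDITION & SPEC =====
-- Pre_ excludes N > len(Q): there A raises IndexError on Q[y] for most inputs; on the few
-- where the scanned odd indices happen to stay in range A returns -1, which B matches anyway.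
def Pre_solve (N : Int) (Q : List Int) : Prop := N ≤ (Q.length : Int)
instance (N : Int) (Q : List Int) : Decidable (Pre_solve N Q) := by unfold Pre_solve; infer_instance
def pvWitness_solve : Int × List Int := (4, [1, 2, 2, 1])
def Spec_solve (N : Int) (Q : List Int) (out : Int) : Prop := out = solve_alt N Q
instance (N : Int) (Q : List Int) (out : Int) : Decidable (Spec_solve N Q out) := by unfold Spec_solve; infer_instance

-- ===== CLAIM (what is proved, stated in full; the proofs are below) =====
def Claim_equal_solve : Prop := ∀ (N : Int) (Q : List Int), Dom_solve N Q → Pre_solve N Q → Spec_solve N Q (solve N Q)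

-- ===== LEMMAS AND PROOFS =====

lemma pyRange_two_nil (a b : Int) (h : b ≤ a) : PySem.List.pyRange a b 2 = [] := by
  rw [PySem.List.pyRange_of_pos a b (by norm_num)]
  simp [show ¬ a < b by omega]

lemma pyRange_two_cons (a b : Int) (h : a < b) :
    PySem.List.pyRange a b 2 = a :: PySem.List.pyRange (a + 2) b 2 := by
  rw [PySem.List.pyRange_of_pos a b (by norm_num),
      PySem.List.pyRange_of_pos (a + 2) b (by norm_num)]
  by_cases h2 : a + 2 < b
  · have hn : ((b - a + 2 - 1) / 2).toNat = ((b - (a + 2) + 2 - 1) / 2).toNat + 1 := by omega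
    simp only [if_pos h, if_pos h2, hn, List.range_succ_eq_map, List.map_cons, List.map_map]
    refine congrArg₂ List.cons (by push_cast; ring) ?_
    apply List.map_congr_left
    intro k _
    simp only [Function.comp_apply, Nat.succ_eq_add_one]
    push_cast
    ring
  · have hn : ((b - a + 2 - 1) / 2).toNat = 1 := by omega
    simp [if_pos h, if_neg h2, hn, List.range_succ]

lemma solveInner_eq_true_iff (Q : List Int) (x y : Int) (zs : List Int) :
    solveInner Q x y zs = true ↔
      ∀ z ∈ zs, PySem.List.pyGetD Q (x + z) 0 = PySem.List.pyGetD Q (y - z) 0 := by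
  induction zs with
  | nil => simp [solveInner]
  | cons z zs ih =>
    by_cases h : PySem.List.pyGetD Q (x + z) 0 ≠ PySem.List.pyGetD Q (y - z) 0
    · simp [solveInner, h]
    · push Not at h
      simp [solveInner, h, ih]

lemma pal_iff (l : List Int) :
    l = l.reverse ↔ ∀ i, i < l.length → l.getD i 0 = l.getD (l.length - 1 - i) 0 := by
  constructor
  · intro h i hi
    conv_lhs => rw [h]
    rw [List.getD_eq_getElem _ _ (by simpa using hi), List.getElem_reverse,
        List.getD_eq_getElem _ _ (by omega)]
  · intro h
    apply List.ext_getElem (by simp)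
    intro i h1 h2
    rw [List.getElem_reverse]
    have := h i h1
    rwa [List.getD_eq_getElem _ _ h1, List.getD_eq_getElem _ _ (by omega)] at this

lemma pyGetD_int (Q : List Int) (i : Int) (h : 0 ≤ i) :
    PySem.List.pyGetD Q i 0 = Q.getD i.toNat 0 := by
  obtain ⟨n, rfl⟩ := Int.eq_ofNat_of_zero_le h
  simp

lemma check_eq (Q : List Int) (x y : Int) (hx : 0 ≤ x) (hxy : x < y)
    (hy : y < (Q.length : Int)) :
    (PySem.List.pyGetD Q x 0 = PySem.List.pyGetD Q y 0 ∧
      solveInner Q x y (PySem.List.pyRange 1 (PySem.Int.floordiv (y - x - 1) 2 + 1) 1) = true)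
    ↔ PySem.List.slice Q (some x) (some (y + 1)) =
        (PySem.List.slice Q (some x) (some (y + 1))).reverse := by
  lift x to ℕ using hx with a
  have hy0 : 0 ≤ y := by omega
  lift y to ℕ using hy0 with b
  have hab : a < b := by exact_mod_cast hxy
  have hb : b < Q.length := by exact_mod_cast hy
  have hfd : PySem.Int.floordiv ((b : Int) - a - 1) 2 + 1 = (((b - a - 1) / 2 + 1 : ℕ) : Int) := by
    rw [PySem.Int.floordiv_eq_ediv_of_pos (by norm_num)]
    omega
  rw [hfd, solveInner_eq_true_iff]
  set m : ℕ := (b - a - 1) / 2 with hm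
  -- the slice as drop/take
  have hcb : ((b : Int) + 1) = (((b + 1 : ℕ)) : Int) := by push_cast; ring
  rw [hcb, PySem.List.slice_natCast]
  set seg : List Int := (Q.drop a).take (b + 1 - a) with hseg
  have hlen : seg.length = b + 1 - a := by
    simp only [hseg, List.length_take, List.length_drop]
    omega
  have hget : ∀ i, i < b + 1 - a → seg.getD i 0 = Q.getD (a + i) 0 := by
    intro i hi
    have h1 : i < seg.length := by omega
    rw [List.getD_eq_getElem _ _ h1, List.getD_eq_getElem _ _ (by omega : a + i < Q.length)]
    simp only [hseg, List.getElem_take, List.getElem_drop]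
  -- left side as a Nat-indexed half check
  have hhalf : (PySem.List.pyGetD Q (a : Int) 0 = PySem.List.pyGetD Q (b : Int) 0 ∧
      ∀ z ∈ PySem.List.pyRange 1 (((m + 1 : ℕ)) : Int) 1,
        PySem.List.pyGetD Q ((a : Int) + z) 0 = PySem.List.pyGetD Q ((b : Int) - z) 0)
      ↔ ∀ z : ℕ, z ≤ m → Q.getD (a + z) 0 = Q.getD (b - z) 0 := by
    constructor
    · rintro ⟨hg, hi⟩ z hz
      match z with
      | 0 => simpa using hg
      | (w + 1) =>
        have hmem : ((w + 1 : ℕ) : Int) ∈ PySem.List.pyRange 1 (((m + 1 : ℕ)) : Int) 1 := by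
          rw [PySem.List.mem_pyRange_one]
          constructor
          · push_cast; omega
          · push_cast; omega
        have h := hi _ hmem
        rw [pyGetD_int Q _ (by push_cast; omega), pyGetD_int Q _ (by push_cast; omega)] at h
        have e1 : ((a : Int) + ((w + 1 : ℕ) : Int)).toNat = a + (w + 1) := by push_cast; omega
        have e2 : ((b : Int) - ((w + 1 : ℕ) : Int)).toNat = b - (w + 1) := by push_cast; omega
        rw [e1, e2] at h
        exact h
    · intro H
      refine ⟨by simpa using H 0 (by omega), ?_⟩
      intro z hzmem
      rw [PySem.List.mem_pyRange_one] at hzmem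
      have hz0 : 0 ≤ z := by omega
      lift z to ℕ using hz0 with w
      have hwm : w ≤ m := by
        have := hzmem.2
        push_cast at this
        omega
      rw [pyGetD_int Q _ (by omega), pyGetD_int Q _ (by omega)]
      have e1 : ((a : Int) + (w : Int)).toNat = a + w := by omega
      have e2 : ((b : Int) - (w : Int)).toNat = b - w := by omega
      rw [e1, e2]
      exact H w hwm
  rw [hhalf, pal_iff seg]
  -- right side as a Nat-indexed full check
  have hfull : (∀ i, i < seg.length → seg.getD i 0 = seg.getD (seg.length - 1 - i) 0)
      ↔ ∀ i : ℕ, i ≤ b - a → Q.getD (a + i) 0 = Q.getD (b - i) 0 := by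
    constructor
    · intro H i hi
      have h := H i (by omega)
      rw [hget i (by omega), hlen] at h
      rw [hget (b + 1 - a - 1 - i) (by omega)] at h
      have e : a + (b + 1 - a - 1 - i) = b - i := by omega
      rwa [e] at h
    · intro H i hi
      rw [hget i (by omega), hlen, hget (b + 1 - a - 1 - i) (by omega)]
      have e : a + (b + 1 - a - 1 - i) = b - i := by omega
      rw [e]
      exact H i (by omega)
  rw [hfull]
  -- half check ↔ full check
  constructor
  · intro H i hi
    by_cases hip : i ≤ m
    · exact H i hip
    · by_cases hmid : i + i = b - a
      · have e : a + i = b - i := by omega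
        rw [e]
      · have hj : b - a - i ≤ m := by omega
        have h := H (b - a - i) hj
        have e1 : a + (b - a - i) = b - i := by omega
        have e2 : b - (b - a - i) = a + i := by omega
        rw [e1, e2] at h
        exact h.symm
  · intro H z hz
    exact H z (by omega)

lemma loop_eq (Q : List Int) (N : Int) (hN : N ≤ (Q.length : Int)) :
    ∀ (k : Nat) (y x r : Int), (N - y).toNat = k → 0 ≤ x → x < y →
    (if ((PySem.List.pyRange y N 2).foldl (solveStep Q) (r, x)).2 ≠ N then -1
     else ((PySem.List.pyRange y N 2).foldl (solveStep Q) (r, x)).1) = solveAltGo N Q r x y := by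
  intro k
  induction k using Nat.strong_induction_on with
  | _ k ih =>
    intro y x r hk hx hxy
    by_cases hyN : y < N
    · rw [pyRange_two_cons y N hyN, List.foldl_cons]
      rw [solveAltGo]
      simp only [if_pos hyN]
      by_cases hc : PySem.List.slice Q (some x) (some (y + 1)) =
          (PySem.List.slice Q (some x) (some (y + 1))).reverse
      · have h := (check_eq Q x y hx hxy (by omega)).mpr hc
        have hstep : solveStep Q (r, x) y = (r + 1, y + 1) := by
          simp only [solveStep]
          rw [if_neg (by simp [h.1]), if_pos h.2]
        rw [hstep, if_pos hc]
        exact ih (N - (y + 2)).toNat (by omega) (y + 2) (y + 1) (r + 1) rfl (by omega) (by omega)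
      · have hstep : solveStep Q (r, x) y = (r, x) := by
          simp only [solveStep]
          by_cases h1 : PySem.List.pyGetD Q x 0 ≠ PySem.List.pyGetD Q y 0
          · rw [if_pos h1]
          · push Not at h1
            by_cases h2 : solveInner Q x y
                (PySem.List.pyRange 1 (PySem.Int.floordiv (y - x - 1) 2 + 1) 1) = true
            · exact absurd ((check_eq Q x y hx hxy (by omega)).mp ⟨h1, h2⟩) hc
            · rw [if_neg (by simp [h1]), if_neg h2]
        rw [hstep, if_neg hc]
        exact ih (N - (y + 2)).toNat (by omega) (y + 2) x r rfl hx (by omega)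
    · rw [pyRange_two_nil y N (by omega), List.foldl_nil]
      rw [solveAltGo]
      simp only [if_neg hyN]
      by_cases hxN : x = N <;> simp [hxN]

-- ===== VERDICT (by name: the statement is the Claim_ definition above) =====
theorem solve_spec : Claim_equal_solve := by
  intro N Q _ hpre
  unfold Spec_solve solve solve_alt
  simpa using loop_eq Q N hpre (N - 1).toNat 1 0 0 rfl (by omega) (by omega)
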